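-- pv_equiv track=rewrite | github.com/garv04/password-strength-checker-using-deeplearning | src/utils/vocab_utils.py | get_vocabulary_stats
-- ===== SOURCE A (Python) =====
-- from typing import Dict, List, Set, Optional, Tuple
--
-- def get_vocabulary_stats(vocab: Dict[str, int]) -> Dict[str, int]:
--     """
--     Get statistics about the vocabulary
--
--     Args:
--         vocab: Dictionary mapping characters to indices
--
--     Returns:
--         Dictionary with statistics like size, etc.
--     """
--     return {
--         "vocab_size": len(vocab),
--         "special_tokens": sum(1 for c in vocab if not c.isalnum() and len(c) > 1),
--         "digits": sum(1 for c in vocab if c.isdigit()),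
--         "lowercase": sum(1 for c in vocab if c.islower()),
--         "uppercase": sum(1 for c in vocab if c.isupper()),
--         "special_chars": sum(1 for c in vocab if not c.isalnum() and len(c) == 1)
--     }
-- ===== SOURCE B (Python) =====
-- def get_vocabulary_stats(vocab):
--     """Single pass over the vocabulary keys with five counters
--     instead of five separate generator-sum passes."""
--     digits = lowercase = uppercase = special_tokens = special_chars = 0
--     for c in vocab:
--         if c.isdigit():
--             digits += 1
--         if c.islower():
--             lowercase += 1
--         if c.isupper():
--             uppercase += 1
--         if not c.isalnum():
--             if len(c) > 1:
--                 special_tokens += 1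
--             elif len(c) == 1:
--                 special_chars += 1
--     return {
--         "vocab_size": len(vocab),
--         "special_tokens": special_tokens,
--         "digits": digits,
--         "lowercase": lowercase,
--         "uppercase": uppercase,
--         "special_chars": special_chars,
--     }
-- ===== Notes on version B (the rewrite author's own statement) =====
-- stated objective: simpler
-- what changed: Replaces five separate generator-sum passes over the vocabulary with one loop that maintains five counters (with a shared not-isalnum branch) and builds the result dict once at the end.
import Mathlib
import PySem

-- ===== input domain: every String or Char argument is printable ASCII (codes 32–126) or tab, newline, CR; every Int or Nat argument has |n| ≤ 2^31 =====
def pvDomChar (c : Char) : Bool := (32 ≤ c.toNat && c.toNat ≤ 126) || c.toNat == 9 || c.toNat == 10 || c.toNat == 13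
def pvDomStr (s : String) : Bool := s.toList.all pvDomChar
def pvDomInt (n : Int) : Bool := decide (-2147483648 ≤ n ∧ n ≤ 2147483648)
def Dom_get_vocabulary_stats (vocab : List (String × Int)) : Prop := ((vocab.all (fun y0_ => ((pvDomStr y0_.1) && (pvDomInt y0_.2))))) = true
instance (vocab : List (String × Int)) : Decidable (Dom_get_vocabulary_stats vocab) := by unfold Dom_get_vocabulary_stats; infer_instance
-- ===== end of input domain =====

-- B replaces A's five separate 0/1-sum passes over the vocabulary keys by one
-- fold maintaining five integer counters; same result, different decomposition.


-- ===== PORT A =====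
-- str.islower / str.isupper ported by hand (PySem has only the char forms):
-- on ASCII the cased characters are exactly the letters, so s.islower() is
-- "some alphabetic character and no uppercase one" (exact on the stated domain).
def pvStrIslower (s : String) : Bool :=
  s.toList.any PySem.Chars.isalpha && s.toList.all (fun c => !PySem.Chars.isupper c)

def pvStrIsupper (s : String) : Bool :=
  s.toList.any PySem.Chars.isalpha && s.toList.all (fun c => !PySem.Chars.islower c)

-- the argument is a Python dict: its keys are the FIRST occurrences of the
-- association list's keys, in order (PySem.List.dedup)
def get_vocabulary_stats (vocab : List (String × Int)) : List (String × Int) :=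
  let keys := PySem.List.dedup (vocab.map Prod.fst)
  [("vocab_size", (keys.length : Int)),
   ("special_tokens",
      (keys.countP (fun c => !PySem.Str.strIsalnum c && decide (1 < PySem.Str.len c)) : Int)),
   ("digits", (keys.countP (fun c => PySem.Str.strIsdigit c) : Int)),
   ("lowercase", (keys.countP (fun c => pvStrIslower c) : Int)),
   ("uppercase", (keys.countP (fun c => pvStrIsupper c) : Int)),
   ("special_chars",
      (keys.countP (fun c => !PySem.Str.strIsalnum c && decide (PySem.Str.len c = 1)) : Int))]

-- ===== PORT B =====
-- one loop body updating the five counters (digits, lowercase, uppercase,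
-- special_tokens, special_chars), exactly as Source B's for-loop does
def pvCountStep (acc : Int × Int × Int × Int × Int) (c : String) :
    Int × Int × Int × Int × Int :=
  let d := if PySem.Str.strIsdigit c then acc.1 + 1 else acc.1
  let l := if pvStrIslower c then acc.2.1 + 1 else acc.2.1
  let u := if pvStrIsupper c then acc.2.2.1 + 1 else acc.2.2.1
  let ts :=
    if !PySem.Str.strIsalnum c then
      if 1 < PySem.Str.len c then (acc.2.2.2.1 + 1, acc.2.2.2.2)
      else if PySem.Str.len c = 1 then (acc.2.2.2.1, acc.2.2.2.2 + 1)
      else (acc.2.2.2.1, acc.2.2.2.2)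
    else (acc.2.2.2.1, acc.2.2.2.2)
  (d, l, u, ts.1, ts.2)

def get_vocabulary_stats_alt (vocab : List (String × Int)) : List (String × Int) :=
  let keys := PySem.List.dedup (vocab.map Prod.fst)
  let acc := keys.foldl pvCountStep (0, 0, 0, 0, 0)
  [("vocab_size", (keys.length : Int)),
   ("special_tokens", acc.2.2.2.1),
   ("digits", acc.1),
   ("lowercase", acc.2.1),
   ("uppercase", acc.2.2.1),
   ("special_chars", acc.2.2.2.2)]

-- ===== PRECONDITION & SPEC =====
def Spec_get_vocabulary_stats (vocab : List (String × Int)) (out : List (String × Int)) : Prop := out = get_vocabulary_stats_alt vocab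
instance (vocab : List (String × Int)) (out : List (String × Int)) : Decidable (Spec_get_vocabulary_stats vocab out) := by unfold Spec_get_vocabulary_stats; infer_instance

-- ===== CLAIM (what is proved, stated in full; the proofs are below) =====
def Claim_equal_get_vocabulary_stats : Prop := ∀ (vocab : List (String × Int)), Dom_get_vocabulary_stats vocab → Spec_get_vocabulary_stats vocab (get_vocabulary_stats vocab)

-- ===== LEMMAS AND PROOFS =====

-- the fold's five counters are the five filtered counts, for any start values
theorem foldl_pvCountStep (ks : List String) (d l u t s : Int) :
    ks.foldl pvCountStep (d, l, u, t, s) =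
      (d + (ks.countP (fun c => PySem.Str.strIsdigit c) : Int),
       l + (ks.countP (fun c => pvStrIslower c) : Int),
       u + (ks.countP (fun c => pvStrIsupper c) : Int),
       t + (ks.countP (fun c => !PySem.Str.strIsalnum c && decide (1 < PySem.Str.len c)) : Int),
       s + (ks.countP (fun c => !PySem.Str.strIsalnum c && decide (PySem.Str.len c = 1)) : Int)) := by
  induction ks generalizing d l u t s with
  | nil => simp
  | cons k ks ih =>
    simp only [List.foldl_cons, List.countP_cons, pvCountStep, ih, Prod.mk.injEq]
    refine ⟨?_, ?_, ?_, ?_, ?_⟩ <;> split_ifs <;> simp_all <;> omega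

-- ===== VERDICT (by name: the statement is the Claim_ definition above) =====
theorem get_vocabulary_stats_spec : Claim_equal_get_vocabulary_stats := by
  intro vocab _
  show _ = _
  simp only [get_vocabulary_stats, get_vocabulary_stats_alt, foldl_pvCountStep]
  simp
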